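-- pv_equiv track=rewrite | github.com/changtotheintothemoon/neurofibromatosis-dataset-analysis | compare_cim_vs_groundtruth.py | categorize_removed_columns
-- ===== SOURCE A (Python) =====
-- def categorize_removed_columns(removed_columns):
--     """
--     Categorize removed columns by type.
--     """
--     categories = {
--         'Platform Generated': ['id', 'name', 'entityId', 'createdOn', 'createdBy', 'modifiedBy', 'etag', 'type', 'benefactorId', 'currentVersion', 'dataFileHandleId', 'parentId'],
--         'Study Metadata': ['studyId', 'studyName', 'resourceType', 'progressReportNumber'],
--         'Funding/Administrative': ['fundingAgency', 'initiative'],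
--         'Unit/Descriptive': ['ageUnit', 'timePointUnit'],
--         'Constant/Derived': ['nf2Genotype']  # Often constant or derivable
--     }
--
--     categorized = {cat: [] for cat in categories}
--     categorized['Other'] = []
--
--     for col, count in removed_columns:
--         categorized_col = False
--         for category, col_list in categories.items():
--             if col in col_list:
--                 categorized[category].append((col, count))
--                 categorized_col = True
--                 break
--         if not categorized_col:
--             categorized['Other'].append((col, count))
--
--     return categorized
-- ===== SOURCE B (Python) =====
-- def categorize_removed_columns(removed_columns):
--     """
--     Categorize removed columns by type.
--     """
--     categories = {
--         'Platform Generated': ['id', 'name', 'entityId', 'createdOn', 'createdBy', 'modifiedBy', 'etag', 'type', 'benefactorId', 'currentVersion', 'dataFileHandleId', 'parentId'],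
--         'Study Metadata': ['studyId', 'studyName', 'resourceType', 'progressReportNumber'],
--         'Funding/Administrative': ['fundingAgency', 'initiative'],
--         'Unit/Descriptive': ['ageUnit', 'timePointUnit'],
--         'Constant/Derived': ['nf2Genotype']
--     }
--
--     # reverse lookup: column name -> category (first category wins)
--     col2cat = {}
--     for cat, cols in categories.items():
--         for col in cols:
--             if col not in col2cat:
--                 col2cat[col] = cat
--
--     categorized = {cat: [] for cat in categories}
--     categorized['Other'] = []
--
--     for col, count in removed_columns:
--         categorized[col2cat.get(col, 'Other')].append((col, count))
--
--     return categorized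
-- ===== Notes on version B (the rewrite author's own statement) =====
-- stated objective: simpler
-- what changed: Replaces the per-element inner scan over category lists (with a categorized_col flag and break) by a reverse-lookup dict column->category built once, so the main loop is a single dict lookup and append per element.
import Mathlib
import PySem

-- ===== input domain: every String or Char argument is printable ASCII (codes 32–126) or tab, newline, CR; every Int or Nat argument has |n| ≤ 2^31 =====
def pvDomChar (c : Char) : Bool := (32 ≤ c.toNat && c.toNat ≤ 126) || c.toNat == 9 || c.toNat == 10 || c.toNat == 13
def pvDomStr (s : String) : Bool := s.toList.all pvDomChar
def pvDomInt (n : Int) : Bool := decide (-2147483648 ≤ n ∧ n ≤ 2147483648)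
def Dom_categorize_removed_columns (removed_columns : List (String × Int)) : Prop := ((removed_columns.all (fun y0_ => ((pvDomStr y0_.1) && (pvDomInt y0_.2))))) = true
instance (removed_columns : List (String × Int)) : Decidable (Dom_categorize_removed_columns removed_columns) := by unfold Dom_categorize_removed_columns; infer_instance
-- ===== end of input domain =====

-- B replaces A's per-element inner scan over the category lists by a reverse-lookup
-- dict column → category built once (objective: simpler main loop).

-- the fixed categories table (shared data of both pythons)
def pvCategories : List (String × List String) := [("Platform Generated", ["id", "name", "entityId", "createdOn", "createdBy", "modifiedBy", "etag", "type", "benefactorId", "currentVersion", "dataFileHandleId", "parentId"]), ("Study Metadata", ["studyId", "studyName", "resourceType", "progressReportNumber"]), ("Funding/Administrative", ["fundingAgency", "initiative"]), ("Unit/Descriptive", ["ageUnit", "timePointUnit"]), ("Constant/Derived", ["nf2Genotype"])]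

-- ===== PORT A =====
-- the inner 'for category, col_list in categories.items(): … break' loop with the categorized_col flag
def pvLoopA (col : String) (count : Int) (cats : List (String × List String))
    (cz : PySem.Dict String (List (String × Int))) : PySem.Dict String (List (String × Int)) × Bool :=
  match cats with
  | [] => (cz, false)
  | (category, col_list) :: rest =>
    if col_list.contains col then
      (cz.modify category [] (fun l => l ++ [(col, count)]), true)
    else pvLoopA col count rest cz

def pvStepA (cz : PySem.Dict String (List (String × Int))) (p : String × Int) :
    PySem.Dict String (List (String × Int)) :=
  let r := pvLoopA p.1 p.2 pvCategories cz
  if r.2 then r.1 else r.1.modify "Other" [] (fun l => l ++ [(p.1, p.2)])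

def pvInit : PySem.Dict String (List (String × Int)) :=
  (pvCategories.foldl (fun d c => d.insert c.1 []) PySem.Dict.empty).insert "Other" []

def categorize_removed_columns (removed_columns : List (String × Int)) : List (String × List (String × Int)) :=
  (removed_columns.foldl pvStepA pvInit).items

-- ===== PORT B =====
-- col2cat: reverse lookup built once from the categories table, first category wins
def pvCol2Cat : PySem.Dict String String :=
  pvCategories.foldl (fun d c => c.2.foldl (fun d col => if d.contains col then d else d.insert col c.1) d) PySem.Dict.empty

def pvStepB (cz : PySem.Dict String (List (String × Int))) (p : String × Int) :
    PySem.Dict String (List (String × Int)) :=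
  cz.modify (pvCol2Cat.getD p.1 "Other") [] (fun l => l ++ [(p.1, p.2)])

def categorize_removed_columns_alt (removed_columns : List (String × Int)) : List (String × List (String × Int)) :=
  (removed_columns.foldl pvStepB pvInit).items

-- ===== PRECONDITION & SPEC =====
def Spec_categorize_removed_columns (removed_columns : List (String × Int)) (out : List (String × List (String × Int))) : Prop := out = categorize_removed_columns_alt removed_columns
instance (removed_columns : List (String × Int)) (out : List (String × List (String × Int))) : Decidable (Spec_categorize_removed_columns removed_columns out) := by unfold Spec_categorize_removed_columns; infer_instance

-- ===== CLAIM (what is proved, stated in full; the proofs are below) =====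
def Claim_equal_categorize_removed_columns : Prop := ∀ (removed_columns : List (String × Int)), Dom_categorize_removed_columns removed_columns → Spec_categorize_removed_columns removed_columns (categorize_removed_columns removed_columns)

-- ===== LEMMAS AND PROOFS =====

-- pvCol2Cat evaluated to its literal association list
theorem pvCol2Cat_eq : pvCol2Cat = PySem.Dict.mk [("id", "Platform Generated"), ("name", "Platform Generated"), ("entityId", "Platform Generated"), ("createdOn", "Platform Generated"), ("createdBy", "Platform Generated"), ("modifiedBy", "Platform Generated"), ("etag", "Platform Generated"), ("type", "Platform Generated"), ("benefactorId", "Platform Generated"), ("currentVersion", "Platform Generated"), ("dataFileHandleId", "Platform Generated"), ("parentId", "Platform Generated"), ("studyId", "Study Metadata"), ("studyName", "Study Metadata"), ("resourceType", "Study Metadata"), ("progressReportNumber", "Study Metadata"), ("fundingAgency", "Funding/Administrative"), ("initiative", "Funding/Administrative"), ("ageUnit", "Unit/Descriptive"), ("timePointUnit", "Unit/Descriptive"), ("nf2Genotype", "Constant/Derived")] := by decide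

-- the inner scan of A agrees with B's reverse lookup, element by element
theorem step_eq (cz : PySem.Dict String (List (String × Int))) (col : String) (count : Int) :
    pvStepA cz (col, count) = pvStepB cz (col, count) := by
  simp only [pvStepA, pvStepB, pvCol2Cat_eq]
  by_cases h0 : col = "id"
  · subst h0; simp [pvLoopA, pvCategories, PySem.Dict.getD_eq_get?_getD, PySem.Dict.get?_mk_cons]
  by_cases h1 : col = "name"
  · subst h1; simp [pvLoopA, pvCategories, PySem.Dict.getD_eq_get?_getD, PySem.Dict.get?_mk_cons]
  by_cases h2 : col = "entityId"
  · subst h2; simp [pvLoopA, pvCategories, PySem.Dict.getD_eq_get?_getD, PySem.Dict.get?_mk_cons]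
  by_cases h3 : col = "createdOn"
  · subst h3; simp [pvLoopA, pvCategories, PySem.Dict.getD_eq_get?_getD, PySem.Dict.get?_mk_cons]
  by_cases h4 : col = "createdBy"
  · subst h4; simp [pvLoopA, pvCategories, PySem.Dict.getD_eq_get?_getD, PySem.Dict.get?_mk_cons]
  by_cases h5 : col = "modifiedBy"
  · subst h5; simp [pvLoopA, pvCategories, PySem.Dict.getD_eq_get?_getD, PySem.Dict.get?_mk_cons]
  by_cases h6 : col = "etag"
  · subst h6; simp [pvLoopA, pvCategories, PySem.Dict.getD_eq_get?_getD, PySem.Dict.get?_mk_cons]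
  by_cases h7 : col = "type"
  · subst h7; simp [pvLoopA, pvCategories, PySem.Dict.getD_eq_get?_getD, PySem.Dict.get?_mk_cons]
  by_cases h8 : col = "benefactorId"
  · subst h8; simp [pvLoopA, pvCategories, PySem.Dict.getD_eq_get?_getD, PySem.Dict.get?_mk_cons]
  by_cases h9 : col = "currentVersion"
  · subst h9; simp [pvLoopA, pvCategories, PySem.Dict.getD_eq_get?_getD, PySem.Dict.get?_mk_cons]
  by_cases h10 : col = "dataFileHandleId"
  · subst h10; simp [pvLoopA, pvCategories, PySem.Dict.getD_eq_get?_getD, PySem.Dict.get?_mk_cons]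
  by_cases h11 : col = "parentId"
  · subst h11; simp [pvLoopA, pvCategories, PySem.Dict.getD_eq_get?_getD, PySem.Dict.get?_mk_cons]
  by_cases h12 : col = "studyId"
  · subst h12; simp [pvLoopA, pvCategories, PySem.Dict.getD_eq_get?_getD, PySem.Dict.get?_mk_cons]
  by_cases h13 : col = "studyName"
  · subst h13; simp [pvLoopA, pvCategories, PySem.Dict.getD_eq_get?_getD, PySem.Dict.get?_mk_cons]
  by_cases h14 : col = "resourceType"
  · subst h14; simp [pvLoopA, pvCategories, PySem.Dict.getD_eq_get?_getD, PySem.Dict.get?_mk_cons]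
  by_cases h15 : col = "progressReportNumber"
  · subst h15; simp [pvLoopA, pvCategories, PySem.Dict.getD_eq_get?_getD, PySem.Dict.get?_mk_cons]
  by_cases h16 : col = "fundingAgency"
  · subst h16; simp [pvLoopA, pvCategories, PySem.Dict.getD_eq_get?_getD, PySem.Dict.get?_mk_cons]
  by_cases h17 : col = "initiative"
  · subst h17; simp [pvLoopA, pvCategories, PySem.Dict.getD_eq_get?_getD, PySem.Dict.get?_mk_cons]
  by_cases h18 : col = "ageUnit"
  · subst h18; simp [pvLoopA, pvCategories, PySem.Dict.getD_eq_get?_getD, PySem.Dict.get?_mk_cons]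
  by_cases h19 : col = "timePointUnit"
  · subst h19; simp [pvLoopA, pvCategories, PySem.Dict.getD_eq_get?_getD, PySem.Dict.get?_mk_cons]
  by_cases h20 : col = "nf2Genotype"
  · subst h20; simp [pvLoopA, pvCategories, PySem.Dict.getD_eq_get?_getD, PySem.Dict.get?_mk_cons]
  have g0 : ¬("id" = col) := fun h => h0 h.symm
  have g1 : ¬("name" = col) := fun h => h1 h.symm
  have g2 : ¬("entityId" = col) := fun h => h2 h.symm
  have g3 : ¬("createdOn" = col) := fun h => h3 h.symm
  have g4 : ¬("createdBy" = col) := fun h => h4 h.symm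
  have g5 : ¬("modifiedBy" = col) := fun h => h5 h.symm
  have g6 : ¬("etag" = col) := fun h => h6 h.symm
  have g7 : ¬("type" = col) := fun h => h7 h.symm
  have g8 : ¬("benefactorId" = col) := fun h => h8 h.symm
  have g9 : ¬("currentVersion" = col) := fun h => h9 h.symm
  have g10 : ¬("dataFileHandleId" = col) := fun h => h10 h.symm
  have g11 : ¬("parentId" = col) := fun h => h11 h.symm
  have g12 : ¬("studyId" = col) := fun h => h12 h.symm
  have g13 : ¬("studyName" = col) := fun h => h13 h.symm
  have g14 : ¬("resourceType" = col) := fun h => h14 h.symm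
  have g15 : ¬("progressReportNumber" = col) := fun h => h15 h.symm
  have g16 : ¬("fundingAgency" = col) := fun h => h16 h.symm
  have g17 : ¬("initiative" = col) := fun h => h17 h.symm
  have g18 : ¬("ageUnit" = col) := fun h => h18 h.symm
  have g19 : ¬("timePointUnit" = col) := fun h => h19 h.symm
  have g20 : ¬("nf2Genotype" = col) := fun h => h20 h.symm
  simp [pvLoopA, pvCategories, PySem.Dict.getD_eq_get?_getD, h0, h1, h2, h3, h4, h5, h6, h7, h8, h9, h10, h11, h12, h13, h14, h15, h16, h17, h18, h19, h20, g0, g1, g2, g3, g4, g5, g6, g7, g8, g9, g10, g11, g12, g13, g14, g15, g16, g17, g18, g19, g20, PySem.Dict.get?]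

theorem foldl_step_eq (l : List (String × Int)) (cz : PySem.Dict String (List (String × Int))) :
    l.foldl pvStepA cz = l.foldl pvStepB cz := by
  induction l generalizing cz with
  | nil => rfl
  | cons p rest ih => cases p with | mk c n => simp only [List.foldl_cons, step_eq]; exact ih _

-- ===== VERDICT (by name: the statement is the Claim_ definition above) =====
theorem categorize_removed_columns_spec : Claim_equal_categorize_removed_columns := by
  intro removed_columns _
  unfold Spec_categorize_removed_columns categorize_removed_columns categorize_removed_columns_alt
  rw [foldl_step_eq]
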